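-- pv_equiv track=rewrite | github.com/YuryRass/Chess_MAS | notation/fen_notation_parser.py | row_length
-- ===== SOURCE A (Python) =====
-- def row_length(row: str) -> int:
--     """Определяет ширину шахматной доски
--
--     Args:
--         row (str): исходная строка для парсинга
--
--     Returns:
--         int: ширина доски
--     """
--     length = 0
--     # единичные, десятые, сотые и т.д. натурального числа
--     number_accumulator = 0
--     symbols = list(row)
--
--     for symbol in symbols:
--         if symbol.isdigit():
--             number_accumulator = number_accumulator * 10 + int(symbol)
--         else:
--             if number_accumulator != 0:
--                 length += number_accumulator + 1
--                 number_accumulator = 0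
--             else:
--                 length += 1
--
--     length += number_accumulator
--     return length
-- ===== SOURCE B (Python) =====
-- def row_length(row: str) -> int:
--     """Width of a chessboard FEN row: each maximal run of digits contributes
--     its numeric value, each non-digit character contributes 1.  The string is
--     consumed run by run (span-style), not character by character with a carry
--     accumulator."""
--     total = 0
--     i = 0
--     n = len(row)
--     while i < n:
--         if row[i].isdigit():
--             j = i
--             while j < n and row[j].isdigit():
--                 j += 1
--             total += int(row[i:j])
--             i = j
--         else:
--             total += 1
--             i += 1
--     return total
-- ===== Notes on version B (the rewrite author's own statement) =====
-- stated objective: alternative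
-- what changed: Replaces A's single per-character scan with a carry accumulator (acc = acc*10 + digit, flushed at each non-digit) by a run-based decomposition: the string is split into maximal digit runs and single non-digit characters, each digit run is converted with int() as a whole and each non-digit adds 1.
import Mathlib
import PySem

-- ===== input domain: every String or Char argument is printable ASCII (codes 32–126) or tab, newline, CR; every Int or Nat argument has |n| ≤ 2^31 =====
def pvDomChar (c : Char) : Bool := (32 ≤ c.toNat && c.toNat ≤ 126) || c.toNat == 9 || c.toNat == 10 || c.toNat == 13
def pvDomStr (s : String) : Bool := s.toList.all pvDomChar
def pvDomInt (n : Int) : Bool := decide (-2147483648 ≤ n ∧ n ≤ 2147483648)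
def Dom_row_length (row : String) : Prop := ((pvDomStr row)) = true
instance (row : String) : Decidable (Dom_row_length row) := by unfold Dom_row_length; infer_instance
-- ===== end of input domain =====

-- B changes the decomposition: maximal digit runs are converted as a whole (run-splitting), instead of A's per-character carry accumulator (objective: alternative).

-- ===== PORT A =====
-- loop body of A: carry accumulator, flushed at each non-digit.
-- int(symbol) is ported as symbol.toNat - 48: exact for the ASCII digit the isdigit guard admits.
def pvStepA (st : Int × Int) (symbol : Char) : Int × Int :=
  if PySem.Chars.isdigit symbol then
    (st.1, st.2 * 10 + ((symbol.toNat : Int) - 48))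
  else if st.2 ≠ 0 then
    (st.1 + st.2 + 1, 0)
  else
    (st.1 + 1, 0)

def row_length (row : String) : Int :=
  let st := row.toList.foldl pvStepA (0, 0)
  st.1 + st.2

-- ===== PORT B =====
-- int(rest[:k]) on a maximal run of ASCII digits: exact on the admitted domain.
def pvRunVal (run : List Char) : Int :=
  run.foldl (fun a c => a * 10 + ((c.toNat : Int) - 48)) 0

-- the while loop of B: consume a maximal digit run (take/dropWhile = the inner
-- scan that finds k, then rest[:k] / rest[k:]) or a single non-digit character.
def pvConsume : List Char → Int
  | [] => 0
  | c :: cs =>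
    if PySem.Chars.isdigit c then
      pvRunVal ((c :: cs).takeWhile PySem.Chars.isdigit)
        + pvConsume ((c :: cs).dropWhile PySem.Chars.isdigit)
    else 1 + pvConsume cs
termination_by l => l.length
decreasing_by
  · simp only [List.dropWhile_cons, *, if_pos]
    exact Nat.lt_succ_of_le (List.length_dropWhile_le _ _)
  · simp

def row_length_alt (row : String) : Int := pvConsume row.toList

-- ===== PRECONDITION & SPEC =====
def Spec_row_length (row : String) (out : Int) : Prop := out = row_length_alt row
instance (row : String) (out : Int) : Decidable (Spec_row_length row out) := by unfold Spec_row_length; infer_instance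

-- ===== CLAIM (what is proved, stated in full; the proofs are below) =====
def Claim_equal_row_length : Prop := ∀ (row : String), Dom_row_length row → Spec_row_length row (row_length row)

-- ===== LEMMAS AND PROOFS =====

-- A's two non-digit branches collapse to one formula: when acc = 0, acc + 1 = 1.
theorem pvStepA_nondigit (l a : Int) (c : Char) (h : PySem.Chars.isdigit c = false) :
    pvStepA (l, a) c = (l + a + 1, 0) := by
  by_cases ha : a = 0 <;> simp [pvStepA, h, ha]

-- A's result is affine in the starting length component.
theorem pv_shift (l : List Char) (len acc : Int) :
    l.foldl pvStepA (len, acc)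
      = (len + (l.foldl pvStepA (0, acc)).1, (l.foldl pvStepA (0, acc)).2) := by
  induction l generalizing len acc with
  | nil => simp
  | cons c cs ih =>
    by_cases hd : PySem.Chars.isdigit c = true
    · simp only [List.foldl_cons, pvStepA, hd, if_pos]
      exact ih _ _
    · rw [List.foldl_cons, List.foldl_cons,
        pvStepA_nondigit _ _ _ (by simpa using hd),
        pvStepA_nondigit _ _ _ (by simpa using hd),
        ih (len + acc + 1) 0, ih (0 + acc + 1) 0]
      simp only [Prod.mk.injEq]
      exact ⟨by ring, trivial⟩

-- Over a run of digits, A only updates the accumulator, with the same fold as pvRunVal.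
theorem pv_run (r : List Char) (hr : ∀ c ∈ r, PySem.Chars.isdigit c = true)
    (len acc : Int) :
    r.foldl pvStepA (len, acc)
      = (len, r.foldl (fun a c => a * 10 + ((c.toNat : Int) - 48)) acc) := by
  induction r generalizing acc with
  | nil => rfl
  | cons c cs ih =>
    have hc : PySem.Chars.isdigit c = true := hr c (by simp)
    simp only [List.foldl_cons, pvStepA, hc, if_pos]
    exact ih (fun x hx => hr x (by simp [hx])) _

-- the head of dropWhile does not satisfy the predicate
theorem pv_dropWhile_head {p : Char → Bool} {l : List Char} {d : Char} {ds : List Char}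
    (h : l.dropWhile p = d :: ds) : p d = false := by
  induction l with
  | nil => simp at h
  | cons c cs ih =>
    by_cases hc : p c = true
    · rw [List.dropWhile_cons, if_pos hc] at h; exact ih h
    · rw [List.dropWhile_cons, if_neg hc] at h
      cases h; simpa using hc

-- Main lemma: A's scan total equals B's run-based total, by strong induction on length.
theorem pv_main : ∀ (n : ℕ) (l : List Char), l.length ≤ n →
    (l.foldl pvStepA ((0:Int), (0:Int))).1 + (l.foldl pvStepA ((0:Int), (0:Int))).2
      = pvConsume l := by
  intro n
  induction n with
  | zero => intro l hl; rw [List.length_eq_zero_iff.mp (Nat.le_zero.mp hl)]; simp [pvConsume]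
  | succ n ih =>
    intro l hl
    match l with
    | [] => simp [pvConsume]
    | c :: cs =>
      by_cases hd : PySem.Chars.isdigit c = true
      · -- digit run: split l into its maximal digit run and the rest
        have hsplit : (c :: cs).takeWhile PySem.Chars.isdigit
            ++ (c :: cs).dropWhile PySem.Chars.isdigit = c :: cs :=
          List.takeWhile_append_dropWhile
        have hrun : ∀ x ∈ (c :: cs).takeWhile PySem.Chars.isdigit,
            PySem.Chars.isdigit x = true := fun x hx => List.mem_takeWhile_imp hx
        have hdrop : (c :: cs).dropWhile PySem.Chars.isdigit = cs.dropWhile PySem.Chars.isdigit := by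
          rw [List.dropWhile_cons, if_pos hd]
        rw [show pvConsume (c :: cs)
              = pvRunVal ((c :: cs).takeWhile PySem.Chars.isdigit)
                + pvConsume ((c :: cs).dropWhile PySem.Chars.isdigit) by
            rw [pvConsume]; simp [hd]]
        conv_lhs => rw [← hsplit]
        rw [List.foldl_append, pv_run _ hrun 0 0]
        rcases hrest : (c :: cs).dropWhile PySem.Chars.isdigit with _ | ⟨d, ds⟩
        · simp [pvRunVal, pvConsume]
        · have hdf : PySem.Chars.isdigit d = false := pv_dropWhile_head hrest
          rw [List.foldl_cons, pvStepA_nondigit _ _ _ hdf, pv_shift]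
          have hds : ds.length ≤ n := by
            have h1 := List.length_dropWhile_le PySem.Chars.isdigit cs
            rw [hdrop] at hrest
            have := congrArg List.length hrest
            simp at this hl ⊢
            omega
          rw [show pvConsume (d :: ds) = 1 + pvConsume ds by rw [pvConsume]; simp [hdf]]
          have := ih ds hds
          simp only [pvRunVal]
          omega
      · have hdf : PySem.Chars.isdigit c = false := by simpa using hd
        rw [List.foldl_cons, pvStepA_nondigit _ _ _ hdf, pv_shift,
          show pvConsume (c :: cs) = 1 + pvConsume cs by rw [pvConsume]; simp [hdf]]
        have := ih cs (by simpa using Nat.le_of_succ_le_succ hl)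
        omega

-- ===== VERDICT (by name: the statement is the Claim_ definition above) =====
theorem row_length_spec : Claim_equal_row_length := by
  intro row _
  unfold Spec_row_length row_length row_length_alt
  exact pv_main row.toList.length row.toList le_rfl
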